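-- pv_equiv track=rewrite | github.com/mayankchauhan971/CppCodes | Searching/q_2_facing_the_sun.py | building_see_sunrise
-- ===== SOURCE A (Python) =====
-- def building_see_sunrise(array):
--     last_tallest = 0
--     count = 0
--
--     for i in array:
--         current_building = int(i)
--         if current_building > last_tallest:
--             last_tallest = current_building
--             count += 1
--
--     return count
-- ===== SOURCE B (Python) =====
-- def building_see_sunrise(array):
--     # two-pass: build a prefix running-maximum table (initial 0), then count
--     ints = [int(i) for i in array]
--     prefix = [0]
--     for v in ints:
--         prefix.append(max(prefix[-1], v))
--     count = 0
--     for v, p in zip(ints, prefix):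
--         if v > p:
--             count += 1
--     return count
-- ===== Notes on version B (the rewrite author's own statement) =====
-- stated objective: alternative
-- what changed: B replaces A's interleaved single pass (running max updated inside the counting loop) by two separate passes: first a prefix running-maximum table is built, then positions with ints[i] > prefix[i] are counted over zip(ints, prefix).
import Mathlib
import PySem

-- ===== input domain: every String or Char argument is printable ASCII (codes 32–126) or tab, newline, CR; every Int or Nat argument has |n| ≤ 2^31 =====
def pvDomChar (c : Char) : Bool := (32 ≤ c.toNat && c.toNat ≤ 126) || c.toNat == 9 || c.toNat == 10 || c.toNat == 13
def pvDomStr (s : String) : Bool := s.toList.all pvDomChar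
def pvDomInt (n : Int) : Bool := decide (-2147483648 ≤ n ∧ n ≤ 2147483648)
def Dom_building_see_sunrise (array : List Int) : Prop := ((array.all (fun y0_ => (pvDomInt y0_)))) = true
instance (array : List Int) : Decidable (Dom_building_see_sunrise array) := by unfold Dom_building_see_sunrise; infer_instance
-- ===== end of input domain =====

-- B rebuilds the result in two separate passes (prefix running-max table, then a zip-based count) instead of A's interleaved single pass; same O(n) cost, alternative decomposition.


-- ===== PORT A =====
-- single pass: state (last_tallest, count); int(i) on an int is the identity
def building_see_sunrise (array : List Int) : Int :=
  (array.foldl (fun s i =>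
      let current_building := i
      if current_building > s.1 then (current_building, s.2 + 1) else s)
    ((0 : Int), (0 : Int))).2

-- ===== PORT B =====
-- pass 1 builds the prefix running-maximum table (initial 0); pass 2 counts over zip
def building_see_sunrise_alt (array : List Int) : Int :=
  let ints := array
  let prefixT := ints.foldl (fun p v => p ++ [max (p.getLastD 0) v]) [(0 : Int)]
  (ints.zip prefixT).foldl (fun c vp => if vp.1 > vp.2 then c + 1 else c) (0 : Int)

-- ===== PRECONDITION & SPEC =====
def Spec_building_see_sunrise (array : List Int) (out : Int) : Prop := out = building_see_sunrise_alt array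
instance (array : List Int) (out : Int) : Decidable (Spec_building_see_sunrise array out) := by unfold Spec_building_see_sunrise; infer_instance

-- ===== CLAIM (what is proved, stated in full; the proofs are below) =====
def Claim_equal_building_see_sunrise : Prop := ∀ (array : List Int), Dom_building_see_sunrise array → Spec_building_see_sunrise array (building_see_sunrise array)

-- ===== LEMMAS AND PROOFS =====

-- reference recursion: number of records above running threshold t
def pvCountB (t : Int) : List Int → Int
  | [] => 0
  | v :: vs => (if v > t then 1 else 0) + pvCountB (max t v) vs

-- the tail of the prefix-max table after seed t
def pvScanMax (t : Int) : List Int → List Int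
  | [] => []
  | v :: vs => max t v :: pvScanMax (max t v) vs

theorem pv_foldA (l : List Int) (t c : Int) :
    (l.foldl (fun s i =>
        let current_building := i
        if current_building > s.1 then (current_building, s.2 + 1) else s) (t, c)).2
      = c + pvCountB t l := by
  induction l generalizing t c with
  | nil => simp [pvCountB]
  | cons v vs ih =>
    simp only [List.foldl_cons, pvCountB]
    by_cases h : v > t
    · have : max t v = v := max_eq_right h.le
      simp [h, this, ih]; ring
    · have : max t v = t := max_eq_left (not_lt.mp h)
      simp [h, this, ih]

theorem pv_build (l p : List Int) :
    l.foldl (fun p v => p ++ [max (p.getLastD 0) v]) p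
      = p ++ pvScanMax (p.getLastD 0) l := by
  induction l generalizing p with
  | nil => simp [pvScanMax]
  | cons v vs ih =>
    simp only [List.foldl_cons, pvScanMax, ih]
    have h : (p ++ [max (p.getLastD 0) v]).getLastD 0 = max (p.getLastD 0) v := by
      simp
    rw [h, List.append_assoc]
    rfl

theorem pv_zipCount (l : List Int) (t c : Int) :
    ((l.zip (t :: pvScanMax t l)).foldl
        (fun c vp => if vp.1 > vp.2 then c + 1 else c) c)
      = c + pvCountB t l := by
  induction l generalizing t c with
  | nil => simp [pvCountB]
  | cons v vs ih =>
    simp only [pvScanMax, List.zip_cons_cons, List.foldl_cons, pvCountB]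
    by_cases h : v > t
    · simp [h, ih]; ring
    · simp [h, ih]

-- ===== VERDICT (by name: the statement is the Claim_ definition above) =====
theorem building_see_sunrise_spec : Claim_equal_building_see_sunrise := by
  intro array _
  show building_see_sunrise array = building_see_sunrise_alt array
  unfold building_see_sunrise building_see_sunrise_alt
  simp only [pv_foldA]
  rw [pv_build]
  exact (pv_zipCount array 0 0).symm
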